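-- pv_equiv track=rewrite | github.com/victortimothyshulist/cart | ico_compiler.py | get_symbol_list
-- ===== SOURCE A (Python) =====
-- def get_symbol_list(inline):
--     symbol_list = list()
--     cur_const = ""
--
--     for term in inline.split():
--         if term[0] == ":":
--
--             if cur_const != "":
--                 symbol_list.append((0, cur_const[1:]))
--                 cur_const = ""
--
--             symbol_list.append((1, term[1:]))
--         else:
--             cur_const += " " + term
--
--     if cur_const != "":
--         symbol_list.append((0, cur_const[1:]))
--
--     return symbol_list
-- ===== SOURCE B (Python) =====
-- from itertools import groupby
--
-- def get_symbol_list(inline):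
--     symbol_list = []
--     for is_sym, run in groupby(inline.split(), key=lambda t: t.startswith(':')):
--         if is_sym:
--             symbol_list.extend((1, t[1:]) for t in run)
--         else:
--             symbol_list.append((0, ' '.join(run)))
--     return symbol_list
-- ===== Notes on version B (the rewrite author's own statement) =====
-- stated objective: simpler
-- what changed: Replaces the running cur_const string accumulator with flush-points by an itertools.groupby pass that splits the words into maximal runs keyed by whether the word begins with a colon, emitting symbol tuples per word and one joined constant tuple per run.
import Mathlib
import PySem

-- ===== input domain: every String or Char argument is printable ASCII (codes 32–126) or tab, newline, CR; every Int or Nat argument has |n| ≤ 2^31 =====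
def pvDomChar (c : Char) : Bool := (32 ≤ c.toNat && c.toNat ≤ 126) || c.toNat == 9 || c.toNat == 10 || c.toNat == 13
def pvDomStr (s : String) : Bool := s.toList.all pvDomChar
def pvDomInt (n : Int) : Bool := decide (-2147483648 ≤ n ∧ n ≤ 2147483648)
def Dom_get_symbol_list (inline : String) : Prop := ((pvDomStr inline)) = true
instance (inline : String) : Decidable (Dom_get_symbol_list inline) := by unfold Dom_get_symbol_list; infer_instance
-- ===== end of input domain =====

-- B replaces A's running cur_const accumulator (with its flush points) by an
-- itertools.groupby pass over the words keyed by whether a word begins with a colon.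

-- ===== PORT A =====
-- A's loop state: (symbol_list, cur_const); cur_const is held as a List Char
-- (the PySem representation of the Python str being concatenated).
def gslStep (st : List (Int × String) × List Char) (term : String) :
    List (Int × String) × List Char :=
  if PySem.Str.pyGet? term 0 == some ':' then
    let st := if st.2.isEmpty then st
              else (st.1 ++ [((0 : Int), String.ofList (st.2.drop 1))], [])
    (st.1 ++ [((1 : Int), PySem.Str.slice term (some 1) none)], st.2)
  else
    (st.1, st.2 ++ ' ' :: term.toList)

def get_symbol_list (inline : String) : List (Int × String) :=
  let st := (PySem.Str.split₀ inline).foldl gslStep ([], [])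
  if st.2.isEmpty then st.1
  else st.1 ++ [((0 : Int), String.ofList (st.2.drop 1))]

-- ===== PORT B =====
-- one group of groupby(words, key=startswith(':')): the tuples it emits
def gslEmit (g : Bool × List String) : List (Int × String) :=
  if g.1 then g.2.map (fun t => ((1 : Int), PySem.Str.slice t (some 1) none))
  else [((0 : Int), PySem.Str.join " " g.2)]

-- itertools.groupby(words, key=lambda t: t.startswith(':')) as (key, run) pairs
def gslRuns : List String → List (Bool × List String)
  | [] => []
  | t :: ts =>
    match gslRuns ts with
    | (k, r) :: rest =>
      if PySem.Str.startswith t ":" == k then (k, t :: r) :: rest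
      else (PySem.Str.startswith t ":", [t]) :: (k, r) :: rest
    | [] => [(PySem.Str.startswith t ":", [t])]

def get_symbol_list_alt (inline : String) : List (Int × String) :=
  (gslRuns (PySem.Str.split₀ inline)).flatMap gslEmit

-- ===== PRECONDITION & SPEC =====
def Spec_get_symbol_list (inline : String) (out : List (Int × String)) : Prop := out = get_symbol_list_alt inline
instance (inline : String) (out : List (Int × String)) : Decidable (Spec_get_symbol_list inline out) := by unfold Spec_get_symbol_list; infer_instance

-- ===== CLAIM (what is proved, stated in full; the proofs are below) =====
def Claim_equal_get_symbol_list : Prop := ∀ (inline : String), Dom_get_symbol_list inline → Spec_get_symbol_list inline (get_symbol_list inline)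

-- ===== LEMMAS AND PROOFS =====

-- A's final flush of the loop state
def gslFin (st : List (Int × String) × List Char) : List (Int × String) :=
  if st.2.isEmpty then st.1
  else st.1 ++ [((0 : Int), String.ofList (st.2.drop 1))]

-- A's loop, written as a recursion over the word list with the pending cur_const
def gslArec : List Char → List String → List (Int × String)
  | cur, [] => if cur.isEmpty then [] else [((0 : Int), String.ofList (cur.drop 1))]
  | cur, t :: ts =>
    if PySem.Str.pyGet? t 0 == some ':' then
      (if cur.isEmpty then [] else [((0 : Int), String.ofList (cur.drop 1))]) ++
        ((1 : Int), PySem.Str.slice t (some 1) none) :: gslArec [] ts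
    else gslArec (cur ++ ' ' :: t.toList) ts

lemma gsl_fold_eq (ws : List String) (acc : List (Int × String)) (cur : List Char) :
    gslFin (ws.foldl gslStep (acc, cur)) = acc ++ gslArec cur ws := by
  induction ws generalizing acc cur with
  | nil => cases cur <;> simp [gslFin, gslArec]
  | cons t ts ih =>
    rw [List.foldl_cons, gslArec]
    by_cases h : (PySem.Str.pyGet? t 0 == some ':') = true
    · by_cases hc : cur.isEmpty
      · rw [List.isEmpty_iff] at hc; subst hc
        simp only [gslStep, h, if_pos, List.isEmpty_nil]
        rw [ih]
        simp
      · simp only [gslStep, h, if_pos, hc]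
        rw [ih]
        simp
    · simp only [gslStep, h]
      rw [ih]
      simp

-- the ' '-prefixed concatenation of a constant run, as A's cur_const builds it
def gslConsCat (r : List String) : List Char := (r.map (fun t => ' ' :: t.toList)).flatten

lemma gsl_join_chars (l : List (List Char)) :
    PySem.Chars.join [' '] l = (l.map (fun cs => ' ' :: cs)).flatten.drop 1 := by
  induction l with
  | nil => simp [PySem.Chars.join_nil]
  | cons a t ih =>
    cases t with
    | nil => simp [PySem.Chars.join_singleton]
    | cons b t' =>
      rw [PySem.Chars.join_cons_cons, ih]
      simp

lemma gsl_join_eq (r : List String) :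
    PySem.Str.join " " r = String.ofList ((gslConsCat r).drop 1) := by
  have hsep : (" " : String).toList = [' '] := by decide
  show String.ofList (PySem.Chars.join (" " : String).toList (r.map String.toList)) = _
  rw [hsep, gsl_join_chars, gslConsCat]
  congr 1
  simp [Function.comp_def]

lemma gsl_sym_test (t : String) :
    (PySem.Str.pyGet? t 0 == some ':') = PySem.Str.startswith t ":" := by
  simp only [PySem.Str.pyGet?, PySem.Str.startswith]
  cases h : t.toList with
  | nil => rfl
  | cons c cs =>
    show (PySem.Chars.pyGet? (c :: cs) 0 == some ':') = PySem.Chars.startswith (c :: cs) [':']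
    simp [PySem.Chars.pyGet?, PySem.List.pyGet?, PySem.List.pyIdx?, PySem.Chars.startswith,
      List.isPrefixOf, eq_comm]

-- B's answer when a pending cur_const (possibly empty) precedes the runs
def gslRhs (cur : List Char) : List (Bool × List String) → List (Int × String)
  | (false, r) :: rest =>
      ((0 : Int), String.ofList ((cur ++ gslConsCat r).drop 1)) :: rest.flatMap gslEmit
  | runs =>
      if cur.isEmpty then runs.flatMap gslEmit
      else ((0 : Int), String.ofList (cur.drop 1)) :: runs.flatMap gslEmit

lemma gsl_rhs_nil (runs : List (Bool × List String)) :
    gslRhs [] runs = runs.flatMap gslEmit := by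
  match runs with
  | (false, r) :: rest => simp [gslRhs, gslEmit, gsl_join_eq]
  -- (the remaining two shapes are definitional)
  | [] => rfl
  | (true, r) :: rest => rfl

lemma gsl_AB (ws : List String) (cur : List Char) :
    gslArec cur ws = gslRhs cur (gslRuns ws) := by
  induction ws generalizing cur with
  | nil => cases cur <;> rfl
  | cons t ts ih =>
    rw [gslArec, gsl_sym_test]
    have hts : (":" : String).toList = [':'] := by decide
    cases h : PySem.Str.startswith t ":" with
    | true =>
      have hC : PySem.Chars.startswith t.toList [':'] = true := by
        simpa [PySem.Str.startswith, hts] using h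
      rw [if_pos rfl, ih [], gsl_rhs_nil]
      cases hr : gslRuns ts with
      | nil =>
        by_cases hc : cur.isEmpty <;>
          simp [gslRuns, hr, gslRhs, gslEmit, PySem.Str.startswith, hts, hC, hc]
      | cons g rest =>
        obtain ⟨k, r⟩ := g
        cases k <;> by_cases hc : cur.isEmpty <;>
          simp [gslRuns, hr, gslRhs, gslEmit, PySem.Str.startswith, hts, hC, hc]
    | false =>
      have hC : PySem.Chars.startswith t.toList [':'] = false := by
        simpa [PySem.Str.startswith, hts] using h
      rw [if_neg (by simp), ih (cur ++ ' ' :: t.toList)]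
      cases hr : gslRuns ts with
      | nil =>
        simp [gslRuns, hr, gslRhs, gslConsCat, PySem.Str.startswith, hts, hC]
      | cons g rest =>
        obtain ⟨k, r⟩ := g
        cases k <;>
          simp [gslRuns, hr, gslRhs, gslEmit, gslConsCat, PySem.Str.startswith, hts, hC]

-- ===== VERDICT (by name: the statement is the Claim_ definition above) =====
theorem get_symbol_list_spec : Claim_equal_get_symbol_list := by
  intro inline _
  show get_symbol_list inline = get_symbol_list_alt inline
  have h := gsl_fold_eq (PySem.Str.split₀ inline) [] []
  simp only [List.nil_append] at h
  rw [get_symbol_list]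
  rw [show (let st := (PySem.Str.split₀ inline).foldl gslStep ([], []);
      if st.2.isEmpty then st.1
      else st.1 ++ [((0 : Int), String.ofList (st.2.drop 1))]) =
      gslFin ((PySem.Str.split₀ inline).foldl gslStep ([], [])) from rfl]
  rw [h, gsl_AB, gsl_rhs_nil, get_symbol_list_alt]
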